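-- pv_equiv track=rewrite | github.com/TU2021/PaperAudit | preprocess_data/add_section.py | build_index_to_section
-- ===== SOURCE A (Python) =====
-- from typing import List, Dict, Any, Optional, Tuple, Set
--
-- ALLOWED_SECTIONS = [
--     "Abstract", "Introduction", "Motivation", "Preliminaries",
--     "Related Work", "Method", "Experiments", "Conclusion",
--     "References", "Appendix", "Checklist"
-- ]
--
-- def parse_index_expr(expr: str) -> List[int]:
--     expr = (expr or "").strip()
--     if not expr:
--         return []
--     out: List[int] = []
--     for part in expr.split(","):
--         part = part.strip()
--         if not part:
--             continue
--         if "-" in part: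
--             a, b = part.split("-", 1)
--             try:
--                 a1, b1 = int(a.strip()), int(b.strip())
--                 if a1 <= b1:
--                     out.extend(range(a1, b1 + 1))
--                 else:
--                     out.extend(range(b1, a1 + 1))
--             except:
--                 continue
--         else:
--             try:
--                 out.append(int(part))
--             except:
--                 continue
--     seen: Set[int] = set()
--     uniq = []
--     for x in out:
--         if x not in seen:
--             uniq.append(x)
--             seen.add(x)
--     return uniq
--
-- def build_index_to_section(labels: List[Dict[str, Any]], total: int) -> Dict[int, str]:
--     i2s: Dict[int, str] = {}
--     for item in labels:
--         section = (item.get("section") or "").strip()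
--         if not section:
--             continue
--         normalized = None
--         for s in ALLOWED_SECTIONS:
--             if s.lower() == section.lower():
--                 normalized = s
--                 break
--         if normalized is None:
--             normalized = section
--         idx_list = parse_index_expr(item.get("content_index", ""))
--         for i in idx_list:
--             if 1 <= i <= total:
--                 i2s[i] = normalized
--
--     last = None
--     for i in range(1, total + 1):
--         if i in i2s:
--             last = i2s[i]
--         else:
--             if last is not None:
--                 i2s[i] = last
--             else:
--                 i2s[i] = "Introduction"
--     return i2s
-- ===== SOURCE B (Python) =====
-- # Different decomposition: normalization via a precomputed lowercase->canonical dict,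
-- # index parsing as a flatMap + dict.fromkeys dedup, the explicit map built in one
-- # dict() call over a flattened assignment stream, and the forward fill emitted as
-- # whole gap ranges between sorted anchors instead of a per-index scan carrying `last`.
-- # (objective: alternative; return value only, no argument is mutated)
-- from typing import List, Dict, Any
--
-- ALLOWED_SECTIONS = [
--     "Abstract", "Introduction", "Motivation", "Preliminaries",
--     "Related Work", "Method", "Experiments", "Conclusion",
--     "References", "Appendix", "Checklist"
-- ]
--
-- _CANON = {s.lower(): s for s in ALLOWED_SECTIONS}
--
-- def _parse_part(part: str) -> List[int]:
--     part = part.strip()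
--     if not part:
--         return []
--     if "-" in part:
--         a, b = part.split("-", 1)
--         try:
--             a1, b1 = int(a.strip()), int(b.strip())
--         except ValueError:
--             return []
--         return list(range(a1, b1 + 1)) if a1 <= b1 else list(range(b1, a1 + 1))
--     try:
--         return [int(part)]
--     except ValueError:
--         return []
--
-- def parse_index_expr(expr: str) -> List[int]:
--     expr = (expr or "").strip()
--     if not expr:
--         return []
--     return list(dict.fromkeys(i for p in expr.split(",") for i in _parse_part(p)))
--
-- def _assignments(labels, total):
--     for item in labels:
--         section = (item.get("section") or "").strip()
--         if not section:
--             continue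
--         normalized = _CANON.get(section.lower(), section)
--         for i in parse_index_expr(item.get("content_index", "")):
--             if 1 <= i <= total:
--                 yield (i, normalized)
--
-- def build_index_to_section(labels, total):
--     i2s = dict(_assignments(labels, total))
--     pairs = list(i2s.items())
--     prev, lo = "Introduction", 1
--     for k in sorted(i2s):
--         pairs.extend((i, prev) for i in range(lo, k))
--         prev, lo = i2s[k], k + 1
--     pairs.extend((i, prev) for i in range(lo, total + 1))
--     return dict(pairs)
-- ===== Notes on version B (the rewrite author's own statement) =====
-- stated objective: alternative
-- what changed: B normalizes sections by one lookup in a precomputed lowercase->canonical dict instead of a linear scan, parses index expressions as a flatMap of a per-part helper deduplicated with dict.fromkeys instead of an accumulating loop with a seen-set, builds the explicit map with a single dict() call over a flattened assignment stream, and does the forward fill by emitting whole gap ranges between sorted anchor indices instead of scanning every index 1..total carrying a `last` value.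
import Mathlib
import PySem

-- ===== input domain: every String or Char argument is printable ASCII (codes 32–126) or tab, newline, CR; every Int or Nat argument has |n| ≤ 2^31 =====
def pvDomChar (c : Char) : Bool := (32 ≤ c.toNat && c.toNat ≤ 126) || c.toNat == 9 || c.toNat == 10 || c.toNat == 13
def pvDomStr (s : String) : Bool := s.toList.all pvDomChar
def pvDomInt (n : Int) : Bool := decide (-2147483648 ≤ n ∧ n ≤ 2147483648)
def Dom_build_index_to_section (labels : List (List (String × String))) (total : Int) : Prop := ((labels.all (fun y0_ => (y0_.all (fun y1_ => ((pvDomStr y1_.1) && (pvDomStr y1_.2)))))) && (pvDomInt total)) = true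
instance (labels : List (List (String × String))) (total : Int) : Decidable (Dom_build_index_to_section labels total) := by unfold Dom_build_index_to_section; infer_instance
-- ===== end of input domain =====

-- B re-decomposes A: dict-based section normalization, flatMap+dedup index parsing, the
-- explicit map as one dict() over a flattened assignment stream, and a forward fill that
-- emits whole gap ranges between sorted anchors instead of a per-index scan carrying `last`.
-- (objective: alternative; equivalence is about the return value, no argument is mutated)

-- ===== PORT A =====
def pvAllowedSections : List String :=
  ["Abstract", "Introduction", "Motivation", "Preliminaries",
   "Related Work", "Method", "Experiments", "Conclusion",
   "References", "Appendix", "Checklist"]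

-- A's parse_index_expr: accumulate `out` over the comma-parts, then the seen/uniq loop.
def pvParseIndexExpr (expr : String) : List Int :=
  let expr := PySem.Str.strip expr
  if expr = "" then []
  else
    let out := ((PySem.Str.split? expr ",").getD []).foldl (fun (out : List Int) part =>
      -- sep "," is nonempty, so split? is `some`
      let part := PySem.Str.strip part
      if part = "" then out
      else if PySem.Str.isIn "-" part then
        -- part.split("-", 1): sep "-" nonempty, so splitMax? is `some`
        let ab := (PySem.Str.splitMax? part "-" 1).getD []
        match PySem.Int.ofStr? (PySem.Str.strip (ab.getD 0 "")),
              PySem.Int.ofStr? (PySem.Str.strip (ab.getD 1 "")) with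
        | some a1, some b1 =>
            if a1 ≤ b1 then out ++ PySem.List.pyRange a1 (b1 + 1) 1
            else out ++ PySem.List.pyRange b1 (a1 + 1) 1
        | _, _ => out
      else
        match PySem.Int.ofStr? part with
        | some n => out ++ [n]
        | none => out) []
    (out.foldl (fun (su : PySem.Set Int × List Int) x =>
        if PySem.Set.contains su.1 x then su
        else (PySem.Set.add su.1 x, su.2 ++ [x])) (PySem.Set.empty, [])).2

def build_index_to_section (labels : List (List (String × String))) (total : Int) : List (Int × String) :=
  let i2s := labels.foldl (fun i2s item =>
    let sect := PySem.Str.strip (((PySem.Dict.mk item).get? "section").getD "")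
    if sect = "" then i2s
    else
      let normalized :=
        match pvAllowedSections.find? (fun s => PySem.Str.lower s == PySem.Str.lower sect) with
        | some s => s
        | none => sect
      (pvParseIndexExpr (((PySem.Dict.mk item).get? "content_index").getD "")).foldl
        (fun d i => if 1 ≤ i ∧ i ≤ total then d.insert i normalized else d) i2s)
    PySem.Dict.empty
  let res := (PySem.List.pyRange 1 (total + 1) 1).foldl
    (fun (st : PySem.Dict Int String × Option String) i =>
      if st.1.contains i then (st.1, some (st.1.getD i ""))
      else
        match st.2 with
        | some l => (st.1.insert i l, st.2)
        | none => (st.1.insert i "Introduction", st.2))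
    (i2s, none)
  res.1.items

-- ===== PORT B =====
-- _CANON = {s.lower(): s for s in ALLOWED_SECTIONS}
def pvCanonDict : PySem.Dict String String :=
  pvAllowedSections.foldl (fun d s => d.insert (PySem.Str.lower s) s) PySem.Dict.empty

def pvParsePart (part : String) : List Int :=
  let part := PySem.Str.strip part
  if part = "" then []
  else if PySem.Str.isIn "-" part then
    let ab := (PySem.Str.splitMax? part "-" 1).getD []
    match PySem.Int.ofStr? (PySem.Str.strip (ab.getD 0 "")),
          PySem.Int.ofStr? (PySem.Str.strip (ab.getD 1 "")) with
    | some a1, some b1 =>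
        if a1 ≤ b1 then PySem.List.pyRange a1 (b1 + 1) 1
        else PySem.List.pyRange b1 (a1 + 1) 1
    | _, _ => []
  else ((PySem.Int.ofStr? part).map (fun n => [n])).getD []

-- list(dict.fromkeys(...)) over the flattened parts = PySem.List.dedup of the flatMap
def pvParseIndexExprAlt (expr : String) : List Int :=
  let expr := PySem.Str.strip expr
  if expr = "" then []
  else PySem.List.dedup (((PySem.Str.split? expr ",").getD []).flatMap pvParsePart)

-- the generator _assignments(labels, total), flattened into one list
def pvAssignments (labels : List (List (String × String))) (total : Int) : List (Int × String) :=
  labels.flatMap (fun item =>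
    let sect := PySem.Str.strip (((PySem.Dict.mk item).get? "section").getD "")
    if sect = "" then []
    else
      let normalized := ((pvCanonDict.get? (PySem.Str.lower sect)).getD sect)
      (pvParseIndexExprAlt (((PySem.Dict.mk item).get? "content_index").getD "")).filterMap
        (fun i => if 1 ≤ i ∧ i ≤ total then some (i, normalized) else none))

def build_index_to_section_alt (labels : List (List (String × String))) (total : Int) : List (Int × String) :=
  let i2s := PySem.Dict.ofList (pvAssignments labels total)
  let st := (PySem.List.sorted i2s.keys (fun x => x) false).foldl
    (fun (st : List (Int × String) × String × Int) k =>
      (st.1 ++ (PySem.List.pyRange st.2.2 k 1).map (fun i => (i, st.2.1)), i2s.getD k "", k + 1))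
    (i2s.items, ("Introduction", 1))
  (PySem.Dict.ofList (st.1 ++ (PySem.List.pyRange st.2.2 (total + 1) 1).map (fun i => (i, st.2.1)))).items

-- ===== PRECONDITION & SPEC =====
def Spec_build_index_to_section (labels : List (List (String × String))) (total : Int) (out : List (Int × String)) : Prop := out = build_index_to_section_alt labels total
instance (labels : List (List (String × String))) (total : Int) (out : List (Int × String)) : Decidable (Spec_build_index_to_section labels total out) := by unfold Spec_build_index_to_section; infer_instance

-- ===== CLAIM (what is proved, stated in full; the proofs are below) =====
def Claim_equal_build_index_to_section : Prop := ∀ (labels : List (List (String × String))) (total : Int), Dom_build_index_to_section labels total → Spec_build_index_to_section labels total (build_index_to_section labels total)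

-- ===== LEMMAS AND PROOFS =====

-- B's _CANON lookup agrees with A's linear scan over ALLOWED_SECTIONS
theorem pvCanonDict_get (key : String) :
    pvCanonDict.get? key = pvAllowedSections.find? (fun s => PySem.Str.lower s == key) := by
  have h : pvCanonDict = PySem.Dict.mk [("abstract","Abstract"),("introduction","Introduction"),("motivation","Motivation"),("preliminaries","Preliminaries"),("related work","Related Work"),("method","Method"),("experiments","Experiments"),("conclusion","Conclusion"),("references","References"),("appendix","Appendix"),("checklist","Checklist")] := by decide
  rw [h]
  simp only [pvAllowedSections, List.find?, PySem.Dict.get?_mk_cons,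
    show PySem.Str.lower "Abstract" = "abstract" from by decide,
    show PySem.Str.lower "Introduction" = "introduction" from by decide,
    show PySem.Str.lower "Motivation" = "motivation" from by decide,
    show PySem.Str.lower "Preliminaries" = "preliminaries" from by decide,
    show PySem.Str.lower "Related Work" = "related work" from by decide,
    show PySem.Str.lower "Method" = "method" from by decide,
    show PySem.Str.lower "Experiments" = "experiments" from by decide,
    show PySem.Str.lower "Conclusion" = "conclusion" from by decide,
    show PySem.Str.lower "References" = "references" from by decide,
    show PySem.Str.lower "Appendix" = "appendix" from by decide,
    show PySem.Str.lower "Checklist" = "checklist" from by decide]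
  by_cases k0 : "abstract" = key
  · simp [k0]
  have b0 : ("abstract" == key) = false := beq_eq_false_iff_ne.mpr k0
  by_cases k1 : "introduction" = key
  · simp [b0, k1]
  have b1 : ("introduction" == key) = false := beq_eq_false_iff_ne.mpr k1
  by_cases k2 : "motivation" = key
  · simp [b0, b1, k2]
  have b2 : ("motivation" == key) = false := beq_eq_false_iff_ne.mpr k2
  by_cases k3 : "preliminaries" = key
  · simp [b0, b1, b2, k3]
  have b3 : ("preliminaries" == key) = false := beq_eq_false_iff_ne.mpr k3
  by_cases k4 : "related work" = key
  · simp [b0, b1, b2, b3, k4]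
  have b4 : ("related work" == key) = false := beq_eq_false_iff_ne.mpr k4
  by_cases k5 : "method" = key
  · simp [b0, b1, b2, b3, b4, k5]
  have b5 : ("method" == key) = false := beq_eq_false_iff_ne.mpr k5
  by_cases k6 : "experiments" = key
  · simp [b0, b1, b2, b3, b4, b5, k6]
  have b6 : ("experiments" == key) = false := beq_eq_false_iff_ne.mpr k6
  by_cases k7 : "conclusion" = key
  · simp [b0, b1, b2, b3, b4, b5, b6, k7]
  have b7 : ("conclusion" == key) = false := beq_eq_false_iff_ne.mpr k7
  by_cases k8 : "references" = key
  · simp [b0, b1, b2, b3, b4, b5, b6, b7, k8]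
  have b8 : ("references" == key) = false := beq_eq_false_iff_ne.mpr k8
  by_cases k9 : "appendix" = key
  · simp [b0, b1, b2, b3, b4, b5, b6, b7, b8, k9]
  have b9 : ("appendix" == key) = false := beq_eq_false_iff_ne.mpr k9
  by_cases k10 : "checklist" = key
  · simp [b0, b1, b2, b3, b4, b5, b6, b7, b8, b9, k10]
  have b10 : ("checklist" == key) = false := beq_eq_false_iff_ne.mpr k10
  simp only [b0, b1, b2, b3, b4, b5, b6, b7, b8, b9, b10]
  rfl

-- A's per-part accumulation step is `out ++ pvParsePart part`
theorem pvStepPart_eq (out : List Int) (part : String) :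
    (let part := PySem.Str.strip part
     if part = "" then out
     else if PySem.Str.isIn "-" part then
       let ab := (PySem.Str.splitMax? part "-" 1).getD []
       match PySem.Int.ofStr? (PySem.Str.strip (ab.getD 0 "")),
             PySem.Int.ofStr? (PySem.Str.strip (ab.getD 1 "")) with
       | some a1, some b1 =>
           if a1 ≤ b1 then out ++ PySem.List.pyRange a1 (b1 + 1) 1
           else out ++ PySem.List.pyRange b1 (a1 + 1) 1
       | _, _ => out
     else
       match PySem.Int.ofStr? part with
       | some n => out ++ [n]
       | none => out)
    = out ++ pvParsePart part := by
  unfold pvParsePart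
  by_cases h0 : PySem.Str.strip part = ""
  · simp [h0]
  by_cases h1 : PySem.Str.isIn "-" (PySem.Str.strip part) = true
  · simp only [h0, h1, if_pos]
    rcases PySem.Int.ofStr? (PySem.Str.strip ((((PySem.Str.splitMax? (PySem.Str.strip part) "-" 1).getD [])).getD 0 "")) with _ | a1 <;>
      rcases PySem.Int.ofStr? (PySem.Str.strip ((((PySem.Str.splitMax? (PySem.Str.strip part) "-" 1).getD [])).getD 1 "")) with _ | b1 <;>
      simp; split_ifs <;> simp
  · have h1' : PySem.Str.isIn "-" (PySem.Str.strip part) = false := by simpa using h1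
    simp only [h0, h1', Bool.false_eq_true, if_false]
    rcases PySem.Int.ofStr? (PySem.Str.strip part) with _ | n <;> simp

-- A's seen/uniq loop keeps both components equal to a running Set.add fold
theorem pvSeenLoop (l : List Int) : ∀ (s : PySem.Set Int),
    l.foldl (fun (su : PySem.Set Int × List Int) x =>
      if PySem.Set.contains su.1 x then su
      else (PySem.Set.add su.1 x, su.2 ++ [x])) (s, s)
    = (l.foldl PySem.Set.add s, l.foldl PySem.Set.add s) := by
  induction l with
  | nil => intro s; rfl
  | cons x l ih =>
    intro s
    simp only [List.foldl_cons]
    by_cases hc : PySem.Set.contains s x = true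
    · have hm : x ∈ s := (PySem.Set.contains_iff s x).mp hc
      rw [if_pos hc, PySem.Set.add_of_mem hm]
      exact ih s
    · have hm : x ∉ s := fun hx => hc ((PySem.Set.contains_iff s x).mpr hx)
      rw [if_neg hc, PySem.Set.add_of_not_mem hm]
      have : PySem.Set.add s x = s ++ [x] := PySem.Set.add_of_not_mem hm
      rw [← this]
      exact ih (PySem.Set.add s x)

-- the two index parsers agree
theorem pvParse_eq (expr : String) : pvParseIndexExpr expr = pvParseIndexExprAlt expr := by
  unfold pvParseIndexExpr pvParseIndexExprAlt
  by_cases h : PySem.Str.strip expr = ""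
  · simp [h]
  · simp only [h, if_false]
    have hout : ((PySem.Str.split? (PySem.Str.strip expr) ",").getD []).foldl (fun (out : List Int) part =>
        let part := PySem.Str.strip part
        if part = "" then out
        else if PySem.Str.isIn "-" part then
          let ab := (PySem.Str.splitMax? part "-" 1).getD []
          match PySem.Int.ofStr? (PySem.Str.strip (ab.getD 0 "")),
                PySem.Int.ofStr? (PySem.Str.strip (ab.getD 1 "")) with
          | some a1, some b1 =>
              if a1 ≤ b1 then out ++ PySem.List.pyRange a1 (b1 + 1) 1
              else out ++ PySem.List.pyRange b1 (a1 + 1) 1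
          | _, _ => out
        else
          match PySem.Int.ofStr? part with
          | some n => out ++ [n]
          | none => out) []
        = ((PySem.Str.split? (PySem.Str.strip expr) ",").getD []).flatMap pvParsePart := by
      refine (PySem.List.foldl_congr_mem _ _ (fun out part => out ++ pvParsePart part) []
        (fun acc x _ => pvStepPart_eq acc x)).trans ?_
      rw [PySem.List.foldl_append_eq_flatMap]
      exact List.nil_append _
    rw [hout]
    have hdd : PySem.List.dedup (((PySem.Str.split? (PySem.Str.strip expr) ",").getD []).flatMap pvParsePart)
        = PySem.Set.ofList (((PySem.Str.split? (PySem.Str.strip expr) ",").getD []).flatMap pvParsePart) := rfl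
    rw [hdd, PySem.Set.ofList_eq_foldl]
    have := pvSeenLoop (((PySem.Str.split? (PySem.Str.strip expr) ",").getD []).flatMap pvParsePart) PySem.Set.empty
    rw [show (PySem.Set.empty : PySem.Set Int) = ([] : List Int) from rfl] at this ⊢
    rw [this]

-- the inner `if in-range: i2s[i] = v` loop is a foldl-insert over the filterMapped pairs
theorem pvInnerLoop (v : String) (total : Int) : ∀ (l : List Int) (d : PySem.Dict Int String),
    l.foldl (fun d i => if 1 ≤ i ∧ i ≤ total then d.insert i v else d) d
    = (l.filterMap (fun i => if 1 ≤ i ∧ i ≤ total then some (i, v) else none)).foldl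
        (fun d p => d.insert p.1 p.2) d := by
  intro l
  induction l with
  | nil => intro d; rfl
  | cons i l ih =>
    intro d
    by_cases hc : 1 ≤ i ∧ i ≤ total
    · simp only [List.foldl_cons, List.filterMap_cons, hc, if_pos, and_self]
      exact ih (d.insert i v)
    · simp only [List.foldl_cons, List.filterMap_cons, hc, if_neg, not_false_iff]
      exact ih d

-- a loop whose step is itself a foldl-insert fuses into one foldl-insert over the flatMap
theorem pvFuse {b : Type} (g : b -> List (Int × String)) (f : PySem.Dict Int String -> b -> PySem.Dict Int String)
    (hf : ∀ (d : PySem.Dict Int String) (x : b), f d x = (g x).foldl (fun d p => d.insert p.1 p.2) d) :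
    ∀ (l : List b) (d : PySem.Dict Int String),
    l.foldl f d = (l.flatMap g).foldl (fun d p => d.insert p.1 p.2) d := by
  intro l
  induction l with
  | nil => intro d; rfl
  | cons x l ih =>
    intro d
    simp only [List.foldl_cons, List.flatMap_cons, List.foldl_append, hf]
    exact ih _

-- A's explicit-map loop equals a foldl-insert over B's flattened assignment list
theorem pvExplicit_eq (total : Int) : ∀ (labels : List (List (String × String))) (d : PySem.Dict Int String),
    labels.foldl (fun i2s item =>
      let sect := PySem.Str.strip (((PySem.Dict.mk item).get? "section").getD "")
      if sect = "" then i2s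
      else
        let normalized :=
          match pvAllowedSections.find? (fun s => PySem.Str.lower s == PySem.Str.lower sect) with
          | some s => s
          | none => sect
        (pvParseIndexExpr (((PySem.Dict.mk item).get? "content_index").getD "")).foldl
          (fun d i => if 1 ≤ i ∧ i ≤ total then d.insert i normalized else d) i2s) d
    = (pvAssignments labels total).foldl (fun d p => d.insert p.1 p.2) d := by
  intro labels d
  unfold pvAssignments
  refine pvFuse _ _ ?_ labels d
  intro d item
  by_cases hs : PySem.Str.strip (((PySem.Dict.mk item).get? "section").getD "") = ""
  · simp [hs]
  · simp only [hs, if_false]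
    have hnorm : (match pvAllowedSections.find? (fun s => PySem.Str.lower s == PySem.Str.lower (PySem.Str.strip (((PySem.Dict.mk item).get? "section").getD ""))) with
        | some s => s
        | none => PySem.Str.strip (((PySem.Dict.mk item).get? "section").getD ""))
        = ((pvCanonDict.get? (PySem.Str.lower (PySem.Str.strip (((PySem.Dict.mk item).get? "section").getD "")))).getD (PySem.Str.strip (((PySem.Dict.mk item).get? "section").getD ""))) := by
      rw [pvCanonDict_get]
      rcases pvAllowedSections.find? (fun s => PySem.Str.lower s == PySem.Str.lower (PySem.Str.strip (((PySem.Dict.mk item).get? "section").getD ""))) with _ | s <;> rfl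
    rw [hnorm, pvParse_eq]
    exact pvInnerLoop _ total _ d

-- canonical fill list: pairs appended for indices j, j+1, …, j+n-1, threading prev like A's `last`
def pvCanon (d : PySem.Dict Int String) (prev : String) (j : Int) : Nat → List (Int × String)
  | 0 => []
  | n + 1 =>
    if d.contains j then pvCanon d (d.getD j "") (j + 1) n
    else (j, prev) :: pvCanon d prev (j + 1) n

def pvApplyFills (acc : PySem.Dict Int String) (l : List (Int × String)) : PySem.Dict Int String :=
  l.foldl (fun a p => a.insert p.1 p.2) acc

theorem pvPyRange_toNat (a b : Int) :
    PySem.List.pyRange a b 1 = PySem.List.pyRange a (a + ((b - a).toNat : Int)) 1 := by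
  by_cases h : a ≤ b
  · have : a + ((b - a).toNat : Int) = b := by omega
    rw [this]
  · rw [PySem.List.pyRange_one_eq_nil (by omega), PySem.List.pyRange_one_eq_nil (by omega)]

-- A's fill loop computes pvApplyFills of the canonical fill list
theorem pvLoopA (d : PySem.Dict Int String) :
    ∀ (n : Nat) (j : Int) (acc : PySem.Dict Int String) (last : Option String),
    (∀ k, j ≤ k → acc.contains k = d.contains k ∧ acc.getD k "" = d.getD k "") →
    ((PySem.List.pyRange j (j + (n : Int)) 1).foldl
      (fun (st : PySem.Dict Int String × Option String) i =>
        if st.1.contains i then (st.1, some (st.1.getD i ""))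
        else
          match st.2 with
          | some l => (st.1.insert i l, st.2)
          | none => (st.1.insert i "Introduction", st.2))
      (acc, last)).1
    = pvApplyFills acc (pvCanon d (last.getD "Introduction") j n) := by
  intro n
  induction n with
  | zero =>
    intro j acc last _
    rw [PySem.List.pyRange_one_eq_nil (by omega)]
    rfl
  | succ n ih =>
    intro j acc last hAg
    rw [PySem.List.pyRange_one_cons (by omega)]
    have htail : j + 1 + (n : Int) = j + ((n + 1 : Nat) : Int) := by push_cast; ring
    simp only [List.foldl_cons]
    have hj := hAg j (le_refl j)
    by_cases hc : d.contains j = true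
    · have hacc : acc.contains j = true := by rw [hj.1]; exact hc
      simp only [hacc, if_pos, pvCanon, hc]
      rw [← htail]
      rw [ih (j + 1) acc (some (acc.getD j "")) (fun k hk => hAg k (by omega))]
      simp [hj.2]
    · have hacc : acc.contains j = false := by rw [hj.1]; simpa using hc
      have hstep :
          (if acc.contains j = true then (acc, some (acc.getD j ""))
           else
             match last with
             | some l => (acc.insert j l, last)
             | none => (acc.insert j "Introduction", last))
          = (acc.insert j (last.getD "Introduction"), last) := by
        rw [if_neg (by simp [hacc])]
        cases last <;> rfl
      rw [hstep]
      simp only [pvCanon, hc, if_neg, Bool.false_eq_true, not_false_iff]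
      rw [← htail]
      rw [ih (j + 1) (acc.insert j (last.getD "Introduction")) last
        (fun k hk => by
          constructor
          · rw [PySem.Dict.contains_insert]
            have : (k == j) = false := by simp; omega
            rw [this, Bool.false_or, (hAg k (by omega)).1]
          · rw [PySem.Dict.getD_insert_of_ne acc (last.getD "Introduction") ""
              (show k ≠ j by omega), (hAg k (by omega)).2])]
      rfl

-- every entry of the canonical fill list is a fresh key in [j, j+n)
theorem pvCanon_entries (d : PySem.Dict Int String) :
    ∀ (n : Nat) (j : Int) (prev : String) (p : Int × String), p ∈ pvCanon d prev j n →
    j ≤ p.1 ∧ p.1 < j + (n : Int) ∧ d.contains p.1 = false := by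
  intro n
  induction n with
  | zero => intro j prev p hp; simp [pvCanon] at hp
  | succ n ih =>
    intro j prev p hp
    by_cases hc : d.contains j = true
    · simp only [pvCanon, hc, if_pos] at hp
      have h := ih (j + 1) (d.getD j "") p hp
      push_cast
      push_cast at h
      exact ⟨by omega, by omega, h.2.2⟩
    · simp only [pvCanon, hc, Bool.false_eq_true, if_neg, not_false_iff, List.mem_cons] at hp
      rcases hp with hp | hp
      · subst hp
        push_cast
        exact ⟨le_refl _, by omega, by simpa using hc⟩
      · have h := ih (j + 1) prev p hp
        push_cast
        push_cast at h
        exact ⟨by omega, by omega, h.2.2⟩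

-- the canonical fill list's keys are strictly increasing
theorem pvCanon_pairwise (d : PySem.Dict Int String) :
    ∀ (n : Nat) (j : Int) (prev : String),
    (pvCanon d prev j n).Pairwise (fun p q => p.1 < q.1) := by
  intro n
  induction n with
  | zero => intro j prev; simp [pvCanon]
  | succ n ih =>
    intro j prev
    by_cases hc : d.contains j = true
    · simp only [pvCanon, hc, if_pos]
      exact ih (j + 1) (d.getD j "")
    · simp only [pvCanon, hc, Bool.false_eq_true, if_neg, not_false_iff]
      refine List.Pairwise.cons ?_ (ih (j + 1) prev)
      intro q hq
      have := pvCanon_entries d n (j + 1) prev q hq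
      simp only []
      omega

-- the canonical fill list with no anchors in range is a plain range fill
theorem pvCanon_no_keys (d : PySem.Dict Int String) :
    ∀ (n : Nat) (j : Int) (prev : String),
    (∀ i, j ≤ i → i < j + (n : Int) → d.contains i = false) →
    pvCanon d prev j n = (PySem.List.pyRange j (j + (n : Int)) 1).map (fun i => (i, prev)) := by
  intro n
  induction n with
  | zero =>
    intro j prev _
    rw [PySem.List.pyRange_one_eq_nil (by omega)]
    rfl
  | succ n ih =>
    intro j prev h
    have hj : d.contains j = false := h j (le_refl j) (by push_cast; omega)
    rw [PySem.List.pyRange_one_cons (by omega)]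
    simp only [pvCanon, hj, Bool.false_eq_true, if_neg, not_false_iff, List.map_cons]
    have htail : j + ((n + 1 : Nat) : Int) = j + 1 + (n : Int) := by push_cast; ring
    rw [htail, ih (j + 1) prev (fun i h1 h2 => h i (by omega) (by omega))]

-- splitting the canonical fill list at the first anchor k
theorem pvCanon_split (d : PySem.Dict Int String) (total : Int) (k : Int)
    (hk2 : k ≤ total) (hck : d.contains k = true) :
    ∀ (m : Nat) (lo : Int) (prev : String), lo + (m : Int) = k →
    (∀ i, lo ≤ i → i < k → d.contains i = false) →
    pvCanon d prev lo (total + 1 - lo).toNat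
    = (PySem.List.pyRange lo k 1).map (fun i => (i, prev))
      ++ pvCanon d (d.getD k "") (k + 1) (total - k).toNat := by
  intro m
  induction m with
  | zero =>
    intro lo prev hm _
    have hlo : lo = k := by omega
    subst hlo
    have h1 : (total + 1 - lo).toNat = (total - lo).toNat + 1 := by omega
    rw [h1]
    simp only [pvCanon, hck, if_pos]
    rw [PySem.List.pyRange_one_eq_nil (by omega)]
    rfl
  | succ m ih =>
    intro lo prev hm hno
    have hlt : lo < k := by omega
    have hlo : d.contains lo = false := hno lo (le_refl lo) hlt
    have h1 : (total + 1 - lo).toNat = (total + 1 - (lo + 1)).toNat + 1 := by omega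
    rw [h1]
    simp only [pvCanon, hlo, Bool.false_eq_true, if_neg, not_false_iff]
    rw [PySem.List.pyRange_one_cons hlt, List.map_cons, List.cons_append]
    rw [ih (lo + 1) prev (by omega) (fun i h1 h2 => hno i (by omega) h2)]

-- B's gap loop over the sorted anchors, as a function of the remaining anchors
def pvRunGaps (d : PySem.Dict Int String) (total : Int) (ks : List Int)
    (st0 : List (Int × String) × String × Int) : List (Int × String) :=
  let st := ks.foldl
    (fun (st : List (Int × String) × String × Int) k =>
      (st.1 ++ (PySem.List.pyRange st.2.2 k 1).map (fun i => (i, st.2.1)), d.getD k "", k + 1)) st0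
  st.1 ++ (PySem.List.pyRange st.2.2 (total + 1) 1).map (fun i => (i, st.2.1))

-- B's gap loop emits exactly the canonical fill list
theorem pvLoopB (d : PySem.Dict Int String) (total : Int) :
    ∀ (ks : List Int) (lo : Int) (prev : String) (acc : List (Int × String)),
    ks.Pairwise (· < ·) →
    (∀ k ∈ ks, lo ≤ k ∧ k ≤ total ∧ d.contains k = true) →
    (∀ k, d.contains k = true → lo ≤ k → k ∈ ks) →
    pvRunGaps d total ks (acc, prev, lo)
    = acc ++ pvCanon d prev lo (total + 1 - lo).toNat := by
  intro ks
  induction ks with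
  | nil =>
    intro lo prev acc _ _ hall
    show acc ++ (PySem.List.pyRange lo (total + 1) 1).map (fun i => (i, prev)) = _
    rw [pvPyRange_toNat lo (total + 1)]
    rw [pvCanon_no_keys d (total + 1 - lo).toNat lo prev
      (fun i h1 _ => by
        by_contra hci
        have : i ∈ ([] : List Int) := hall i (by simpa using hci) h1
        simp at this)]
  | cons k ks ih =>
    intro lo prev acc hpw hmem hall
    have hk := hmem k (List.mem_cons_self ..)
    have hpw' : ks.Pairwise (· < ·) := hpw.of_cons
    have hgt : ∀ x ∈ ks, k < x := fun x hx => (List.pairwise_cons.mp hpw).1 x hx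
    have hrec : pvRunGaps d total (k :: ks) (acc, prev, lo)
        = pvRunGaps d total ks
            (acc ++ (PySem.List.pyRange lo k 1).map (fun i => (i, prev)), d.getD k "", k + 1) := rfl
    rw [hrec]
    rw [ih (k + 1) (d.getD k "") (acc ++ (PySem.List.pyRange lo k 1).map (fun i => (i, prev)))
      hpw'
      (fun x hx => ⟨by have := hgt x hx; omega, (hmem x (List.mem_cons_of_mem _ hx)).2⟩)
      (fun x hcx hx => by
        have := hall x hcx (by omega)
        rcases List.mem_cons.mp this with h | h
        · omega
        · exact h)]
    rw [List.append_assoc]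
    congr 1
    rw [show (total + 1 - (k + 1)).toNat = (total - k).toNat from by omega]
    rw [pvCanon_split d total k hk.2.1 hk.2.2 (k - lo).toNat lo prev (by omega)
      (fun i h1 h2 => by
        by_contra hci
        have hmem' := hall i (by simpa using hci) h1
        rcases List.mem_cons.mp hmem' with h | h
        · omega
        · have := hgt i h; omega)]

-- applying the canonical fill list to d appends its pairs to d.items
theorem pvApplyFills_items (d : PySem.Dict Int String) (l : List (Int × String))
    (hfresh : ∀ p ∈ l, d.contains p.1 = false) (hnd : (l.map Prod.fst).Nodup) :
    (pvApplyFills d l).items = d.items ++ l := by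
  have h := PySem.Dict.items_foldl_insert_fresh l Prod.fst Prod.snd d hfresh hnd
  simpa using h

-- Dict.ofList of a list with distinct keys returns that list as its items
theorem pvOfList_items (l : List (Int × String)) (hnd : (l.map Prod.fst).Nodup) :
    (PySem.Dict.ofList l).items = l := by
  have h := PySem.Dict.items_foldl_insert_fresh l Prod.fst Prod.snd PySem.Dict.empty
    (fun p _ => PySem.Dict.contains_empty p.1) hnd
  simpa using h

-- keys of the explicit map: distinct and within [1, total]
theorem pvKeys_facts (labels : List (List (String × String))) (total : Int) :
    (PySem.Dict.ofList (pvAssignments labels total)).keys.Nodup ∧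
    (∀ k ∈ (PySem.Dict.ofList (pvAssignments labels total)).keys, 1 ≤ k ∧ k ≤ total) := by
  refine ⟨PySem.Dict.nodup_keys_ofList _, ?_⟩
  intro k hk
  have hb : ∀ p ∈ pvAssignments labels total, 1 ≤ p.1 ∧ p.1 ≤ total := by
    intro p hp
    simp only [pvAssignments, List.mem_flatMap] at hp
    obtain ⟨item, _, hp⟩ := hp
    by_cases hs : PySem.Str.strip (((PySem.Dict.mk item).get? "section").getD "") = ""
    · simp [hs] at hp
    · simp only [hs, if_false, List.mem_filterMap] at hp
      obtain ⟨i, _, hi⟩ := hp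
      by_cases hc : 1 ≤ i ∧ i ≤ total
      · simp only [if_pos hc] at hi
        cases hi
        exact hc
      · simp [hc] at hi
  have hkeys : (PySem.Dict.ofList (pvAssignments labels total)).keys
      = PySem.Set.ofList ((pvAssignments labels total).map Prod.fst) := by
    have h := PySem.Dict.keys_foldl_insert_key (pvAssignments labels total) Prod.fst
      (fun _ p => p.2) PySem.Dict.empty
    simp only [PySem.Dict.keys_empty] at h
    rw [show (PySem.Dict.ofList (pvAssignments labels total))
        = (pvAssignments labels total).foldl (fun d p => d.insert p.1 p.2) PySem.Dict.empty from rfl]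
    rw [show ((pvAssignments labels total).foldl (fun d p => d.insert p.1 p.2) PySem.Dict.empty)
        = ((pvAssignments labels total).foldl (fun d p => d.insert (Prod.fst p) ((fun (_ : PySem.Dict Int String) (q : Int × String) => q.2) d p)) PySem.Dict.empty) from rfl]
    rw [h]
    rfl
  rw [hkeys] at hk
  rw [PySem.Set.mem_ofList] at hk
  obtain ⟨p, hp, rfl⟩ := List.mem_map.mp hk
  exact hb p hp

-- ===== VERDICT (by name: the statement is the Claim_ definition above) =====
theorem build_index_to_section_spec : Claim_equal_build_index_to_section := by
  intro labels total _
  unfold Spec_build_index_to_section build_index_to_section build_index_to_section_alt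
  dsimp only
  obtain ⟨hnd, hbd⟩ := pvKeys_facts labels total
  set d := PySem.Dict.ofList (pvAssignments labels total) with hdd
  have hexp := pvExplicit_eq total labels PySem.Dict.empty
  set canon := pvCanon d "Introduction" 1 total.toNat with hcanon
  -- facts about the canonical fill list
  have hfresh : ∀ p ∈ canon, d.contains p.1 = false := by
    intro p hp
    exact (pvCanon_entries d total.toNat 1 "Introduction" p hp).2.2
  have hcnd : (canon.map Prod.fst).Nodup := by
    have h1 : (canon.map Prod.fst).Pairwise (· < ·) :=
      List.pairwise_map.mpr (pvCanon_pairwise d total.toNat 1 "Introduction")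
    exact h1.imp (fun h => ne_of_lt h)
  -- A side
  have hA : (((PySem.List.pyRange 1 (total + 1) 1).foldl
      (fun (st : PySem.Dict Int String × Option String) i =>
        if st.1.contains i then (st.1, some (st.1.getD i ""))
        else
          match st.2 with
          | some l => (st.1.insert i l, st.2)
          | none => (st.1.insert i "Introduction", st.2))
      (d, none)).1)
      = pvApplyFills d canon := by
    rw [pvPyRange_toNat 1 (total + 1)]
    have h1 : (total + 1 - 1).toNat = total.toNat := by omega
    rw [h1]
    exact pvLoopA d total.toNat 1 d none (fun k _ => ⟨rfl, rfl⟩)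
  -- B side
  have hsorted : (PySem.List.sorted d.keys (fun x => x) false).Pairwise (· < ·) := by
    have hperm : (PySem.List.sorted d.keys (fun x => x) false).Perm d.keys :=
      PySem.List.sorted_perm ..
    have hnd' : (PySem.List.sorted d.keys (fun x => x) false).Nodup := hperm.nodup_iff.mpr hnd
    have hle : (PySem.List.sorted d.keys (fun x => x) false).Pairwise (· ≤ ·) :=
      PySem.List.sorted_pairwise ..
    exact (hle.and hnd').imp (fun h => lt_of_le_of_ne h.1 h.2)
  have hmemS : ∀ k, k ∈ PySem.List.sorted d.keys (fun x => x) false ↔ k ∈ d.keys :=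
    fun k => PySem.List.mem_sorted ..
  have hB := pvLoopB d total (PySem.List.sorted d.keys (fun x => x) false) 1 "Introduction" d.items
    hsorted
    (fun k hk => by
      have hk' := (hmemS k).mp hk
      have := hbd k hk'
      exact ⟨this.1, this.2, (PySem.Dict.contains_iff_mem_keys _ _).mpr hk'⟩)
    (fun k hck _ => (hmemS k).mpr ((PySem.Dict.contains_iff_mem_keys _ _).mp hck))
  have h1 : (total + 1 - 1).toNat = total.toNat := by omega
  rw [h1] at hB
  -- assemble
  rw [hexp]
  rw [show ((pvAssignments labels total).foldl (fun d p => d.insert p.1 p.2) PySem.Dict.empty) = d from rfl]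
  rw [hA]
  have hcombined : ((d.items ++ canon).map Prod.fst).Nodup := by
    rw [List.map_append]
    rw [List.nodup_append]
    have hdisj : ∀ k, k ∈ List.map Prod.fst d.items → k ∈ List.map Prod.fst canon → False := by
      intro k hk1 hk2
      obtain ⟨p, hp, hpk⟩ := List.mem_map.mp hk2
      have hfr := hfresh p hp
      have hkk : d.contains k = true :=
        (PySem.Dict.contains_iff_mem_keys _ _).mpr (by simpa [PySem.Dict.keys] using hk1)
      rw [hpk, hkk] at hfr
      exact Bool.noConfusion hfr
    exact ⟨by simpa [PySem.Dict.keys] using hnd, hcnd, fun a ha b hb hab => hdisj a ha (hab ▸ hb)⟩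
  rw [pvApplyFills_items d canon hfresh hcnd]
  show d.items ++ canon
    = (PySem.Dict.ofList (pvRunGaps d total (PySem.List.sorted d.keys (fun x => x) false)
        (d.items, "Introduction", 1))).items
  rw [hB, ← hcanon]
  exact (pvOfList_items _ hcombined).symm
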